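-- pv_equiv track=rewrite | github.com/nacho09021973/basurin | experiment/hsc_detector/stage_hsc_detector.py | _parse_ope_key
-- ===== SOURCE A (Python) =====
-- def _parse_ope_key(key: str) -> list[str]:
--     """
--     Parse OPE key format "op1_op2_op3" handling composite names with brackets.
--
--     Handles tower operator suffixes like "[sigma sigma]_0" as a single operator.
--
--     Examples:
--         "sigma_sigma_sigma" -> ["sigma", "sigma", "sigma"]
--         "sigma_sigma_[sigma sigma]_0" -> ["sigma", "sigma", "[sigma sigma]_0"]
--     """
--     parts: list[str] = []
--     current = ""
--     bracket_depth = 0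
--     just_closed_bracket = False
--
--     i = 0
--     while i < len(key):
--         char = key[i]
--
--         if char == "[":
--             bracket_depth += 1
--             current += char
--             just_closed_bracket = False
--         elif char == "]":
--             bracket_depth -= 1
--             current += char
--             just_closed_bracket = True
--         elif char == "_" and bracket_depth == 0:
--             # Check if this underscore is part of a tower suffix (e.g., "_0", "_1")
--             # after a bracket close
--             if just_closed_bracket and i + 1 < len(key) and key[i + 1].isdigit():
--                 # This is a tower index suffix, include it in current operator
--                 current += char
--                 just_closed_bracket = False
--             else:
--                 if current:
--                     parts.append(current)
--                     current = ""
--                 just_closed_bracket = False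
--         else:
--             current += char
--             if not char.isdigit():
--                 just_closed_bracket = False
--
--         i += 1
--
--     if current:
--         parts.append(current)
--
--     return parts
-- ===== SOURCE B (Python) =====
-- DIGITS = "0123456789"
--
--
-- def _split_top(key):
--     """Pass 1: split key at every underscore lying outside brackets."""
--     segs = []
--     cur = ""
--     depth = 0
--     for c in key:
--         if c == "_" and depth == 0:
--             segs.append(cur)
--             cur = ""
--         else:
--             depth += (c == "[") - (c == "]")
--             cur += c
--     segs.append(cur)
--     return segs
--
--
-- def _merge(segs):
--     """Pass 2: glue a tower-index segment back onto its predecessor; drop empties."""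
--     out = []
--     cur = segs[0]
--     for s in segs[1:]:
--         if cur.rstrip(DIGITS).endswith("]") and s[:1].isdigit():
--             cur = cur + "_" + s
--         else:
--             if cur:
--                 out.append(cur)
--             cur = s
--     if cur:
--         out.append(cur)
--     return out
--
--
-- def _parse_ope_key(key: str) -> list[str]:
--     return _merge(_split_top(key))
-- ===== Notes on version B (the rewrite author's own statement) =====
-- stated objective: alternative
-- what changed: Replaces A's single character-state machine (current buffer, bracket depth, just_closed_bracket flag with lookahead) by two passes: first split at all top-level underscores, then a merge pass that re-glues a tower-index segment onto its predecessor when the predecessor stripped of trailing digits ends in ']' and the segment starts with a digit, dropping empty segments.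
import Mathlib
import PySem

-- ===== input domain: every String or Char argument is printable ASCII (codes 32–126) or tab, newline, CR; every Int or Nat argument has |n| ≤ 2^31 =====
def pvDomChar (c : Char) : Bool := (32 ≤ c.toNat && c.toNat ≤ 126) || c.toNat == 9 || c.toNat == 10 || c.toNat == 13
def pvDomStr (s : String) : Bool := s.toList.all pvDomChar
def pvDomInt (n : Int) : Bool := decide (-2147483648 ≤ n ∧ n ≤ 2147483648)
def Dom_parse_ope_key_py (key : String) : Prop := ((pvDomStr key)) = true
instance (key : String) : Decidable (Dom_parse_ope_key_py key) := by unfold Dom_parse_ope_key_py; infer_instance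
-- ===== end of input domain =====

-- B replaces A's one-pass state machine by split-at-top-level-underscores followed by a
-- tower-suffix merge pass (objective: alternative decomposition, same cost).

-- ===== PORT A =====
-- "i + 1 < len(key) and key[i + 1].isdigit()": the next character exists and is a digit
def nextDigitA (cs : List Char) : Bool := match cs with | c2 :: _ => c2.isDigit | [] => false

-- state machine over the characters; state = (parts, current, bracket_depth, just_closed_bracket)
def goA : List Char → List (List Char) → List Char → Int → Bool → List (List Char)
  | [], parts, cur, _, _ => if cur = [] then parts else parts ++ [cur]
  | c :: cs, parts, cur, depth, jcb =>
    if c = '[' then goA cs parts (cur ++ [c]) (depth + 1) false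
    else if c = ']' then goA cs parts (cur ++ [c]) (depth - 1) true
    else if c = '_' ∧ depth = 0 then
      if jcb && nextDigitA cs then
        goA cs parts (cur ++ [c]) depth false
      else
        if cur = [] then goA cs parts [] depth false
        else goA cs (parts ++ [cur]) [] depth false
    else goA cs parts (cur ++ [c]) depth (if c.isDigit then jcb else false)

def parse_ope_key_py (key : String) : List String :=
  (goA key.toList [] [] 0 false).map (fun l => String.ofList l)

-- ===== PORT B =====
-- pass 1 (_split_top): split at every '_' at bracket depth 0; accumulator loop as in Source B
def splitB : List Char → Int → List Char → List (List Char) → List (List Char)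
  | [], _, cur, segs => segs ++ [cur]
  | c :: cs, depth, cur, segs =>
    if c = '_' ∧ depth = 0 then splitB cs depth [] (segs ++ [cur])
    else splitB cs (depth + (if c = '[' then 1 else 0) - (if c = ']' then 1 else 0)) (cur ++ [c]) segs

-- cur.rstrip(DIGITS).endswith("]"): strip trailing digits, test the last character — computed
-- from the right end (exact: the last non-digit character of cur is ']')
def towerB (cur : List Char) : Bool := (cur.reverse.dropWhile Char.isDigit).head? == some ']'

-- s[:1].isdigit(): the first character of s exists and is a digit
def headDigit (s : List Char) : Bool := match s with | c :: _ => c.isDigit | [] => false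

-- pass 2 (_merge): glue a tower-index segment onto its predecessor, drop empty segments
def mergeB : List Char → List (List Char) → List (List Char) → List (List Char)
  | cur, [], out => out ++ (if cur = [] then [] else [cur])
  | cur, s :: ss, out =>
    if towerB cur && headDigit s then mergeB (cur ++ '_' :: s) ss out
    else mergeB s ss (out ++ (if cur = [] then [] else [cur]))

def parse_ope_key_py_alt (key : String) : List String :=
  match splitB key.toList 0 [] [] with
  | [] => []   -- unreachable: splitB always returns at least one segment
  | s :: ss => (mergeB s ss []).map (fun l => String.ofList l)

-- ===== PRECONDITION & SPEC =====
def Spec_parse_ope_key_py (key : String) (out : List String) : Prop := out = parse_ope_key_py_alt key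
instance (key : String) (out : List String) : Decidable (Spec_parse_ope_key_py key out) := by unfold Spec_parse_ope_key_py; infer_instance

-- ===== CLAIM (what is proved, stated in full; the proofs are below) =====
def Claim_equal_parse_ope_key_py : Prop := ∀ (key : String), Dom_parse_ope_key_py key → Spec_parse_ope_key_py key (parse_ope_key_py key)

-- ===== LEMMAS AND PROOFS =====

-- accumulator-free versions of the two passes, used as the common specification
def splitR : List Char → Int → List Char × List (List Char)
  | [], _ => ([], [])
  | c :: cs, depth =>
    if c = '_' ∧ depth = 0 then ([], (splitR cs depth).1 :: (splitR cs depth).2)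
    else
      let d' := depth + (if c = '[' then 1 else 0) - (if c = ']' then 1 else 0)
      (c :: (splitR cs d').1, (splitR cs d').2)

def mergeR : List Char → List (List Char) → List (List Char)
  | cur, [] => if cur = [] then [] else [cur]
  | cur, s :: ss =>
    if towerB cur && headDigit s then mergeR (cur ++ '_' :: s) ss
    else (if cur = [] then [] else [cur]) ++ mergeR s ss

theorem towerB_nil : towerB [] = false := rfl

theorem towerB_append (cur : List Char) (c : Char) :
    towerB (cur ++ [c]) = if c.isDigit then towerB cur else (c == ']') := by
  simp [towerB, List.dropWhile]
  by_cases h : c.isDigit <;> simp [h]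

theorem nextDigitA_eq (cs : List Char) : nextDigitA cs = headDigit cs := by
  cases cs <;> rfl

theorem headDigit_splitR (cs : List Char) (d : Int) :
    headDigit (splitR cs d).1 = headDigit cs := by
  cases cs with
  | nil => rfl
  | cons c cs =>
    by_cases h : c = '_' ∧ d = 0
    · rcases h with ⟨h1, h2⟩
      subst h1; subst h2
      simp [splitR, headDigit]
    · simp [splitR, h, headDigit]

theorem splitB_eq (cs : List Char) (d : Int) (cur : List Char) (segs : List (List Char)) :
    splitB cs d cur segs = segs ++ (cur ++ (splitR cs d).1) :: (splitR cs d).2 := by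
  induction cs generalizing d cur segs with
  | nil => simp [splitB, splitR]
  | cons c cs ih =>
    by_cases h : c = '_' ∧ d = 0
    · simp [splitB, splitR, h, ih]
    · simp [splitB, splitR, h, ih]

theorem mergeB_eq (cur : List Char) (ss : List (List Char)) (out : List (List Char)) :
    mergeB cur ss out = out ++ mergeR cur ss := by
  induction ss generalizing cur out with
  | nil => simp [mergeB, mergeR]
  | cons s ss ih =>
    by_cases h : towerB cur && headDigit s
    · simp [mergeB, mergeR, h, ih]
    · simp [mergeB, mergeR, h, ih]

theorem goA_eq (cs : List Char) (parts : List (List Char)) (cur : List Char) (d : Int) :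
    goA cs parts cur d (towerB cur) =
      parts ++ mergeR (cur ++ (splitR cs d).1) (splitR cs d).2 := by
  induction cs generalizing parts cur d with
  | nil =>
    simp [goA, splitR, mergeR]
    by_cases h : cur = [] <;> simp [h]
  | cons c cs ih =>
    by_cases hb : c = '['
    · subst hb
      have hjcb : towerB (cur ++ ['[']) = false := by simp [towerB_append]
      have h2 := ih parts (cur ++ ['[']) (d + 1)
      rw [hjcb] at h2
      simp [goA, splitR, h2]
    · by_cases hc : c = ']'
      · subst hc
        have hjcb : towerB (cur ++ [']']) = true := by simp [towerB_append]
        have h2 := ih parts (cur ++ [']']) (d - 1)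
        rw [hjcb] at h2
        simp [goA, splitR, hb, h2]
      · by_cases hu : c = '_' ∧ d = 0
        · rcases hu with ⟨hu, hd⟩
          subst hu; subst hd
          have hcond' : (towerB cur && headDigit (splitR cs (0:Int)).1)
              = (towerB cur && headDigit cs) := by rw [headDigit_splitR]
          by_cases hcond : (towerB cur && headDigit cs) = true
          · have hjcb : towerB (cur ++ ['_']) = false := by simp [towerB_append]
            have h2 := ih parts (cur ++ ['_']) 0
            rw [hjcb] at h2
            simp [goA, splitR, nextDigitA_eq, hcond, h2, mergeR, hcond']
          · have hnil := ih parts [] 0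
            rw [towerB_nil] at hnil
            have hsome := ih (parts ++ [cur]) [] 0
            rw [towerB_nil] at hsome
            by_cases hcur : cur = []
            · subst hcur
              simp [goA, splitR, nextDigitA_eq, hnil, mergeR, towerB_nil]
            · simp [goA, splitR, nextDigitA_eq, hcond, hcur, hsome, mergeR, hcond']
        · -- generic character: not '[', not ']', not a top-level '_'
          have hjcb : (if c.isDigit then towerB cur else false) = towerB (cur ++ [c]) := by
            rw [towerB_append]
            by_cases hdig : c.isDigit <;> simp [hdig, hc]
          have h2 := ih parts (cur ++ [c]) d
          simp [goA, splitR, hb, hc, hu, hjcb, h2]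

-- ===== VERDICT (by name: the statement is the Claim_ definition above) =====
theorem parse_ope_key_py_spec : Claim_equal_parse_ope_key_py := by
  intro key _
  show _ = _
  unfold parse_ope_key_py parse_ope_key_py_alt
  rw [splitB_eq]
  have h := goA_eq key.toList [] [] 0
  rw [towerB_nil] at h
  simp only [h, List.nil_append, mergeB_eq]
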